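-- pv_equiv track=rewrite | github.com/marketcalls/openalgo | broker/motilal/mapping/order_data.py | calculate_order_statistics
-- ===== SOURCE A (Python) =====
-- def calculate_order_statistics(order_data):
--     """
--     Calculates statistics from order data, including totals for buy orders, sell orders,
--     completed orders, open orders, and rejected orders.
--
--     Parameters:
--     - order_data: A list of dictionaries, where each dictionary represents an order.
--
--     Returns:
--     - A dictionary containing counts of different types of orders.
--     """
--     # Initialize counters
--     total_buy_orders = total_sell_orders = 0
--     total_completed_orders = total_open_orders = total_rejected_orders = 0
--
--     if order_data:
--         for order in order_data:
--             # Count buy and sell orders - Motilal uses 'buyorsell' field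
--             if order.get("buyorsell", "").upper() == "BUY":
--                 total_buy_orders += 1
--             elif order.get("buyorsell", "").upper() == "SELL":
--                 total_sell_orders += 1
--
--             # Count orders based on their status - Motilal uses 'orderstatus' field
--             order_status = order.get("orderstatus", "").lower()
--             if order_status == "traded" or order_status == "complete":
--                 total_completed_orders += 1
--             elif order_status in ["confirm", "sent", "open"]:
--                 total_open_orders += 1
--             elif order_status in ["rejected", "error"]:
--                 total_rejected_orders += 1
--             # Note: 'cancel' status orders are not counted in statistics (following Angel One implementation)
--
--     # Compile and return the statistics
--     return {
--         "total_buy_orders": total_buy_orders,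
--         "total_sell_orders": total_sell_orders,
--         "total_completed_orders": total_completed_orders,
--         "total_open_orders": total_open_orders,
--         "total_rejected_orders": total_rejected_orders,
--     }
-- ===== SOURCE B (Python) =====
-- def calculate_order_statistics(order_data):
--     bs = [o.get("buyorsell", "").upper() for o in order_data]
--     st = [o.get("orderstatus", "").lower() for o in order_data]
--     return {
--         "total_buy_orders": bs.count("BUY"),
--         "total_sell_orders": bs.count("SELL"),
--         "total_completed_orders": st.count("traded") + st.count("complete"),
--         "total_open_orders": st.count("confirm") + st.count("sent") + st.count("open"),
--         "total_rejected_orders": st.count("rejected") + st.count("error"),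
--     }
-- ===== Notes on version B (the rewrite author's own statement) =====
-- stated objective: idiomatic
-- what changed: Replaces the single-pass if/elif accumulator over five mutable counters with two mapped lists of normalized field values and derives all five totals by keyed list.count sums.
import Mathlib
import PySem

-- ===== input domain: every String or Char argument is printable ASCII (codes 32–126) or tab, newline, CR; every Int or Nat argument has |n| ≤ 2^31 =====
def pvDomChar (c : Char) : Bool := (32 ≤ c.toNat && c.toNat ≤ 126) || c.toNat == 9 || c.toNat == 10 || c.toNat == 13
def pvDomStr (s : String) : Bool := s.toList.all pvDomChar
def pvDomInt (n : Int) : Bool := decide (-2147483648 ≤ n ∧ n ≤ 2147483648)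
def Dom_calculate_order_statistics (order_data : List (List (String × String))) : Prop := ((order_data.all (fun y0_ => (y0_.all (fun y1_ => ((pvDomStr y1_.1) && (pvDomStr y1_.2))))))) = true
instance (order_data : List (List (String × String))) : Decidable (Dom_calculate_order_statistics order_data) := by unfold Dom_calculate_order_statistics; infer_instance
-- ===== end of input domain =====

-- B replaces A's single-pass if/elif accumulator with mapped normalized-field lists and keyed count sums (idiomatic; return value only).

-- ===== PORT A =====
-- one loop iteration: the two if/elif chains over the five counters
def pvAStep (s : Int × Int × Int × Int × Int) (order : List (String × String)) :
    Int × Int × Int × Int × Int :=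
  let (b, sl, c, o, r) := s
  let bs := PySem.Str.upper ((PySem.Dict.mk order).getD "buyorsell" "")
  let (b, sl) :=
    if bs = "BUY" then (b + 1, sl)
    else if bs = "SELL" then (b, sl + 1)
    else (b, sl)
  let st := PySem.Str.lower ((PySem.Dict.mk order).getD "orderstatus" "")
  if st = "traded" ∨ st = "complete" then (b, sl, c + 1, o, r)
  else if st = "confirm" ∨ st = "sent" ∨ st = "open" then (b, sl, c, o + 1, r)
  else if st = "rejected" ∨ st = "error" then (b, sl, c, o, r + 1)
  else (b, sl, c, o, r)

def calculate_order_statistics (order_data : List (List (String × String))) : List (String × Int) :=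
  let s := ((0 : Int), (0 : Int), (0 : Int), (0 : Int), (0 : Int))
  -- 'if order_data:' — an empty list skips the loop either way
  let s := if order_data ≠ [] then order_data.foldl pvAStep s else s
  [("total_buy_orders", s.1), ("total_sell_orders", s.2.1),
   ("total_completed_orders", s.2.2.1), ("total_open_orders", s.2.2.2.1),
   ("total_rejected_orders", s.2.2.2.2)]

-- ===== PORT B =====
def calculate_order_statistics_alt (order_data : List (List (String × String))) : List (String × Int) :=
  let bs := order_data.map (fun o => PySem.Str.upper ((PySem.Dict.mk o).getD "buyorsell" ""))
  let st := order_data.map (fun o => PySem.Str.lower ((PySem.Dict.mk o).getD "orderstatus" ""))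
  [("total_buy_orders", (bs.count "BUY" : Int)),
   ("total_sell_orders", (bs.count "SELL" : Int)),
   ("total_completed_orders", ((st.count "traded" : Int) + (st.count "complete" : Int))),
   ("total_open_orders", ((st.count "confirm" : Int) + (st.count "sent" : Int) + (st.count "open" : Int))),
   ("total_rejected_orders", ((st.count "rejected" : Int) + (st.count "error" : Int)))]

-- ===== PRECONDITION & SPEC =====
def Spec_calculate_order_statistics (order_data : List (List (String × String))) (out : List (String × Int)) : Prop := out = calculate_order_statistics_alt order_data
instance (order_data : List (List (String × String))) (out : List (String × Int)) : Decidable (Spec_calculate_order_statistics order_data out) := by unfold Spec_calculate_order_statistics; infer_instance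

-- ===== CLAIM (what is proved, stated in full; the proofs are below) =====
def Claim_equal_calculate_order_statistics : Prop := ∀ (order_data : List (List (String × String))), Dom_calculate_order_statistics order_data → Spec_calculate_order_statistics order_data (calculate_order_statistics order_data)

-- ===== LEMMAS AND PROOFS =====

-- per-iteration effect of A's if/elif chains: each counter gains an indicator
set_option maxHeartbeats 1000000 in
theorem pvAStep_eq (b sl c o r : Int) (x : List (String × String)) :
    pvAStep (b, sl, c, o, r) x =
      (b + (if PySem.Str.upper ((PySem.Dict.mk x).getD "buyorsell" "") = "BUY" then 1 else 0),
       sl + (if PySem.Str.upper ((PySem.Dict.mk x).getD "buyorsell" "") = "SELL" then 1 else 0),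
       c + (if PySem.Str.lower ((PySem.Dict.mk x).getD "orderstatus" "") = "traded" then 1 else 0)
         + (if PySem.Str.lower ((PySem.Dict.mk x).getD "orderstatus" "") = "complete" then 1 else 0),
       o + (if PySem.Str.lower ((PySem.Dict.mk x).getD "orderstatus" "") = "confirm" then 1 else 0)
         + (if PySem.Str.lower ((PySem.Dict.mk x).getD "orderstatus" "") = "sent" then 1 else 0)
         + (if PySem.Str.lower ((PySem.Dict.mk x).getD "orderstatus" "") = "open" then 1 else 0),
       r + (if PySem.Str.lower ((PySem.Dict.mk x).getD "orderstatus" "") = "rejected" then 1 else 0)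
         + (if PySem.Str.lower ((PySem.Dict.mk x).getD "orderstatus" "") = "error" then 1 else 0)) := by
  rw [pvAStep]
  generalize PySem.Str.upper ((PySem.Dict.mk x).getD "buyorsell" "") = u
  generalize PySem.Str.lower ((PySem.Dict.mk x).getD "orderstatus" "") = v
  split_ifs <;> simp_all

theorem pvA_foldl (l : List (List (String × String))) (b sl c o r : Int) :
    l.foldl pvAStep (b, sl, c, o, r) =
      (b + ((l.map (fun x => PySem.Str.upper ((PySem.Dict.mk x).getD "buyorsell" ""))).count "BUY" : Int),
       sl + ((l.map (fun x => PySem.Str.upper ((PySem.Dict.mk x).getD "buyorsell" ""))).count "SELL" : Int),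
       c + ((l.map (fun x => PySem.Str.lower ((PySem.Dict.mk x).getD "orderstatus" ""))).count "traded" : Int)
         + ((l.map (fun x => PySem.Str.lower ((PySem.Dict.mk x).getD "orderstatus" ""))).count "complete" : Int),
       o + ((l.map (fun x => PySem.Str.lower ((PySem.Dict.mk x).getD "orderstatus" ""))).count "confirm" : Int)
         + ((l.map (fun x => PySem.Str.lower ((PySem.Dict.mk x).getD "orderstatus" ""))).count "sent" : Int)
         + ((l.map (fun x => PySem.Str.lower ((PySem.Dict.mk x).getD "orderstatus" ""))).count "open" : Int),
       r + ((l.map (fun x => PySem.Str.lower ((PySem.Dict.mk x).getD "orderstatus" ""))).count "rejected" : Int)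
         + ((l.map (fun x => PySem.Str.lower ((PySem.Dict.mk x).getD "orderstatus" ""))).count "error" : Int)) := by
  induction l generalizing b sl c o r with
  | nil => simp
  | cons hd tl ih =>
    simp only [List.foldl_cons, pvAStep_eq, ih, List.map_cons, List.count_cons,
      beq_iff_eq, Prod.mk.injEq]
    refine ⟨?_, ?_, ?_, ?_, ?_⟩ <;> split_ifs <;> push_cast <;> ring

-- ===== VERDICT (by name: the statement is the Claim_ definition above) =====
theorem calculate_order_statistics_spec : Claim_equal_calculate_order_statistics := by
  intro od _
  show _ = _
  unfold calculate_order_statistics calculate_order_statistics_alt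
  by_cases h : od = []
  · subst h; simp
  · simp only [h, ne_eq, not_false_iff, if_true, pvA_foldl]
    simp
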